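-- pv_equiv track=rewrite | github.com/2412434-tipu/EISight | software/eisight_logger/gates/common.py | aggregate_verdict
-- ===== SOURCE A (Python) =====
-- from enum import Enum
-- from typing import Any, Dict, Iterable, List, Union
--
-- class GateVerdict(str, Enum):
--     """Tri-state gate outcome.
--
--     Values are uppercase strings so the JSON / text artifacts
--     self-document. Inheriting from str makes the members
--     trivially JSON-serializable -- json.dumps(verdict) produces
--     "PASS" / "WARN" / "FAIL" without a custom encoder.
--     """
--
--     PASS = "PASS"
--     WARN = "WARN"
--     FAIL = "FAIL"
--
-- def aggregate_verdict(verdicts: Iterable[Any]) -> GateVerdict: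
--     """Worst-case aggregator: any FAIL -> FAIL; any WARN -> WARN; else PASS.
--
--     Used by every gate to roll a per-item verdict column up to
--     the report-level overall. verdicts may be a Series of
--     strings, an iterable of GateVerdict members, or a mix; each
--     value is coerced through GateVerdict(...) which raises on
--     an unknown string. Empty input returns PASS.
--     """
--     seen = set()
--     for v in verdicts:
--         seen.add(GateVerdict(v) if not isinstance(v, GateVerdict) else v)
--     if GateVerdict.FAIL in seen:
--         return GateVerdict.FAIL
--     if GateVerdict.WARN in seen:
--         return GateVerdict.WARN
--     return GateVerdict.PASS
-- ===== SOURCE B (Python) =====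
-- from enum import Enum
-- from typing import Any, Iterable
--
--
-- class GateVerdict(str, Enum):
--     PASS = "PASS"
--     WARN = "WARN"
--     FAIL = "FAIL"
--
--
-- def aggregate_verdict(verdicts: Iterable[Any]) -> GateVerdict:
--     """Worst-case aggregator: running max over severity ranks."""
--     order = [GateVerdict.PASS, GateVerdict.WARN, GateVerdict.FAIL]
--     rank = {m: i for i, m in enumerate(order)}
--     worst = 0
--     for v in verdicts:
--         worst = max(worst, rank[GateVerdict(v)])
--     return order[worst]
-- ===== Notes on version B (the rewrite author's own statement) =====
-- stated objective: alternative
-- what changed: Replaces the set of seen verdicts plus two ordered membership checks with a single running maximum over a severity rank (PASS=0, WARN=1, FAIL=2), indexing an ordered list by the final max.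
import Mathlib
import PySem

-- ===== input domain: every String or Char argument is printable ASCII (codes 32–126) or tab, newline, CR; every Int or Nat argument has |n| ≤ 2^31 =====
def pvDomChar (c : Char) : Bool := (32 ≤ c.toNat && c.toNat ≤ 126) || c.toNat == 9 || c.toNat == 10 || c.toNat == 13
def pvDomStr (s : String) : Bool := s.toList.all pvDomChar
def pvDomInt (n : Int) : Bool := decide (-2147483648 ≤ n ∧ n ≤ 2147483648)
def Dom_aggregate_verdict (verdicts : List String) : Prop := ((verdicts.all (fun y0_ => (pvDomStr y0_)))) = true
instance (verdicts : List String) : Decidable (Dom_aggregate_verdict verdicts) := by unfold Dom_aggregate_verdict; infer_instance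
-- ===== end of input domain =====

-- B replaces A's set-of-seen-verdicts + two ordered membership checks with a running
-- maximum severity rank; same O(n) cost, different state maintained.

-- ===== PORT A =====
-- seen = set(); for v: seen.add(GateVerdict(v)); then FAIL/WARN membership checks.
-- Under Pre_ every v is a valid verdict string, so GateVerdict(v) is v itself.
def aggregate_verdict (verdicts : List String) : String :=
  let seen : PySem.Set String := verdicts.foldl (fun s v => PySem.Set.add s v) PySem.Set.empty
  if PySem.Set.contains seen "FAIL" then "FAIL"
  else if PySem.Set.contains seen "WARN" then "WARN"
  else "PASS"

-- ===== PORT B =====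
-- rank = {PASS:0, WARN:1, FAIL:2}; running max; index the ordered list by the max.
def pvRank : PySem.Dict String Int := PySem.Dict.ofList [("PASS", 0), ("WARN", 1), ("FAIL", 2)]

def aggregate_verdict_alt (verdicts : List String) : String :=
  let order := ["PASS", "WARN", "FAIL"]
  let worst := verdicts.foldl (fun m v => max m (pvRank.getD v 0)) 0
  PySem.List.pyGetD order worst ""

-- ===== PRECONDITION & SPEC =====
-- A raises ValueError (GateVerdict(v)) on any element other than "PASS"/"WARN"/"FAIL"; Pre_ excludes exactly those.
def Pre_aggregate_verdict (verdicts : List String) : Prop :=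
  ∀ v ∈ verdicts, v = "PASS" ∨ v = "WARN" ∨ v = "FAIL"
instance (verdicts : List String) : Decidable (Pre_aggregate_verdict verdicts) := by
  unfold Pre_aggregate_verdict; infer_instance

def pvWitness_aggregate_verdict : List String := ["WARN", "PASS", "WARN"]

def Spec_aggregate_verdict (verdicts : List String) (out : String) : Prop := out = aggregate_verdict_alt verdicts
instance (verdicts : List String) (out : String) : Decidable (Spec_aggregate_verdict verdicts out) := by unfold Spec_aggregate_verdict; infer_instance

-- ===== CLAIM (what is proved, stated in full; the proofs are below) =====
def Claim_equal_aggregate_verdict : Prop := ∀ (verdicts : List String), Dom_aggregate_verdict verdicts → Pre_aggregate_verdict verdicts → Spec_aggregate_verdict verdicts (aggregate_verdict verdicts)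

-- ===== LEMMAS AND PROOFS =====

-- the set A builds is Set.ofList, so membership is list membership
lemma seen_contains (verdicts : List String) (x : String) :
    PySem.Set.contains (verdicts.foldl (fun s v => PySem.Set.add s v) PySem.Set.empty) x
      = verdicts.contains x := by
  have h : verdicts.foldl (fun s v => PySem.Set.add s v) PySem.Set.empty
      = PySem.Set.ofList verdicts := (PySem.Set.ofList_eq_foldl verdicts).symm
  rw [h]
  simp [PySem.Set.contains, PySem.Set.mem_ofList]

lemma rank_pass : pvRank.getD "PASS" 0 = 0 := by decide
lemma rank_warn : pvRank.getD "WARN" 0 = 1 := by decide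
lemma rank_fail : pvRank.getD "FAIL" 0 = 2 := by decide

lemma pvMax00 : max (0:Int) 0 = 0 := by decide
lemma pvMax01 : max (0:Int) 1 = 1 := by decide
lemma pvMax02 : max (0:Int) 2 = 2 := by decide
lemma pvMax10 : max (1:Int) 0 = 1 := by decide
lemma pvMax11 : max (1:Int) 1 = 1 := by decide
lemma pvMax12 : max (1:Int) 2 = 2 := by decide
lemma pvMax20 : max (2:Int) 0 = 2 := by decide
lemma pvMax21 : max (2:Int) 1 = 2 := by decide
lemma pvMax22 : max (2:Int) 2 = 2 := by decide

-- closed form for B's running-max fold on valid verdict lists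
lemma fold_max_char (verdicts : List String)
    (hp : ∀ v ∈ verdicts, v = "PASS" ∨ v = "WARN" ∨ v = "FAIL") :
    ∀ w : Int, w = 0 ∨ w = 1 ∨ w = 2 →
    verdicts.foldl (fun m v => max m (pvRank.getD v 0)) w
      = if "FAIL" ∈ verdicts ∨ w = 2 then 2
        else if "WARN" ∈ verdicts ∨ w = 1 then 1 else 0 := by
  induction verdicts with
  | nil =>
    intro w hw
    rcases hw with rfl | rfl | rfl <;> simp
  | cons v vs ih =>
    intro w hw
    have hv := hp v (List.mem_cons_self ..)
    have hp' : ∀ u ∈ vs, u = "PASS" ∨ u = "WARN" ∨ u = "FAIL" :=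
      fun u hu => hp u (List.mem_cons_of_mem _ hu)
    rcases hv with rfl | rfl | rfl <;>
      rcases hw with rfl | rfl | rfl <;>
      · simp only [List.foldl_cons, rank_pass, rank_warn, rank_fail,
          pvMax00, pvMax01, pvMax02, pvMax10, pvMax11, pvMax12, pvMax20, pvMax21, pvMax22]
        rw [ih hp' _ (by decide)]
        by_cases hF : "FAIL" ∈ vs <;> by_cases hW : "WARN" ∈ vs <;>
          simp [hF, hW, List.mem_cons]

-- ===== VERDICT (by name: the statement is the Claim_ definition above) =====
theorem aggregate_verdict_spec : Claim_equal_aggregate_verdict := by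
  intro verdicts _ hpre
  unfold Spec_aggregate_verdict aggregate_verdict aggregate_verdict_alt
  rw [fold_max_char verdicts hpre 0 (Or.inl rfl)]
  simp only [seen_contains]
  by_cases hF : "FAIL" ∈ verdicts <;> by_cases hW : "WARN" ∈ verdicts <;>
    simp [hF, hW, List.contains_eq_mem, PySem.List.pyGetD]
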